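-- pv_equiv track=rewrite | github.com/computerguided/digitmind-python | main.py | create_combinations
-- ===== SOURCE A (Python) =====
-- def create_combinations(difficulty_level : int) -> list:
--     digits = list(range(difficulty_level + 3))
--     return [(w,x,y,z)           \
--         for w in digits         \
--         for x in digits         \
--         for y in digits         \
--         for z in digits         \
--         if  w not in (x,y,z)    \
--         and x not in (y,z)      \
--         and y != z ]
-- ===== SOURCE B (Python) =====
-- def create_combinations(difficulty_level: int) -> list:
--     def selections(pool):
--         if not pool:
--             return []
--         head, rest = pool[0], pool[1:]
--         return [(head, rest)] + [(v, [head] + r) for v, r in selections(rest)]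
--     digits = list(range(difficulty_level + 3))
--     return [(w, x, y, z)
--             for w, r1 in selections(digits)
--             for x, r2 in selections(r1)
--             for y, r3 in selections(r2)
--             for z in r3]
-- ===== Notes on version B (the rewrite author's own statement) =====
-- stated objective: alternative
-- what changed: Instead of four nested scans over the full digit list with distinctness guards, B recursively selects each digit together with the remaining pool (a selections helper), so only valid tuples are ever constructed and no filtering happens.
import Mathlib
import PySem

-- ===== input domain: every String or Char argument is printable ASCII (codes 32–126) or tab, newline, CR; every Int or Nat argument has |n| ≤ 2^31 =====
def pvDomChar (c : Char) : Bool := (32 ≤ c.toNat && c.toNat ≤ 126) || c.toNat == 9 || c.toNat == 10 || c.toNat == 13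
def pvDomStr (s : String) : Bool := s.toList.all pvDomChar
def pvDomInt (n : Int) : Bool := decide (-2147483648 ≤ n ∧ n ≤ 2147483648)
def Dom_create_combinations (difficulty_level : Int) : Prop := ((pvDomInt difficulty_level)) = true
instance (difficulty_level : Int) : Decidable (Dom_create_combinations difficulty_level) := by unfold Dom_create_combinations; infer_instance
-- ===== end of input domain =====

-- B replaces A's four filtered scans over the whole digit list by recursive selection
-- from a shrinking pool (no distinctness tests); alternative algorithm, same output.

-- ===== PORT A =====
def create_combinations (difficulty_level : Int) : List (Int × Int × Int × Int) :=
  let digits := PySem.List.pyRange 0 (difficulty_level + 3) 1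
  digits.flatMap fun w =>
    digits.flatMap fun x =>
      digits.flatMap fun y =>
        digits.flatMap fun z =>
          if (!(w == x || w == y || w == z) && !(x == y || x == z) && (y != z)) then
            [(w, x, y, z)]
          else []

-- ===== PORT B =====
-- Source B's selections helper: each element of the pool paired with the rest of the pool
def pvSelections : List Int → List (Int × List Int)
  | [] => []
  | h :: rest => (h, rest) :: (pvSelections rest).map (fun p => (p.1, h :: p.2))

def create_combinations_alt (difficulty_level : Int) : List (Int × Int × Int × Int) :=
  let digits := PySem.List.pyRange 0 (difficulty_level + 3) 1
  (pvSelections digits).flatMap fun p =>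
    (pvSelections p.2).flatMap fun q =>
      (pvSelections q.2).flatMap fun r =>
        r.2.map fun z => (p.1, q.1, r.1, z)

-- ===== PRECONDITION & SPEC =====
def Spec_create_combinations (difficulty_level : Int) (out : List (Int × Int × Int × Int)) : Prop := out = create_combinations_alt difficulty_level
instance (difficulty_level : Int) (out : List (Int × Int × Int × Int)) : Decidable (Spec_create_combinations difficulty_level out) := by unfold Spec_create_combinations; infer_instance

-- ===== CLAIM (what is proved, stated in full; the proofs are below) =====
def Claim_equal_create_combinations : Prop := ∀ (difficulty_level : Int), Dom_create_combinations difficulty_level → Spec_create_combinations difficulty_level (create_combinations difficulty_level)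

-- ===== LEMMAS AND PROOFS =====

theorem pv_flatMap_if {γ : Type} (xs : List Int) (p : Int → Bool) (f : Int → List γ) :
    (xs.flatMap fun a => if p a then f a else []) = (xs.filter p).flatMap f := by
  induction xs with
  | nil => rfl
  | cons a xs ih =>
    simp only [List.flatMap_cons, List.filter_cons]
    cases h : p a <;> simp [ih]

theorem pv_flatMap_if_const {γ : Type} (xs : List Int) (c : Bool) (f : Int → List γ) :
    (xs.flatMap fun a => if c then f a else []) = if c then xs.flatMap f else [] := by
  cases c <;> simp

theorem pv_flatMap_single {γ : Type} (xs : List Int) (f : Int → γ) :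
    (xs.flatMap fun a => [f a]) = xs.map f := by
  induction xs with
  | nil => rfl
  | cons a xs ih => simp [List.flatMap_cons, ih]

theorem pv_if_and {γ : Type} (c d : Bool) (t : List γ) :
    (if c && d then t else []) = (if c then (if d then t else []) else []) := by
  cases c <;> simp

-- on a duplicate-free pool, selections pairs each element with the pool minus that element
theorem pv_selections_eq (xs : List Int) (h : xs.Nodup) :
    pvSelections xs = xs.map (fun a => (a, xs.filter (fun b => !(a == b)))) := by
  induction xs with
  | nil => rfl
  | cons hd rest ih =>
    rcases List.nodup_cons.mp h with ⟨hmem, hnd⟩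
    simp only [pvSelections, ih hnd, List.map_map, List.map_cons]
    congr 1
    · rw [List.filter_cons_of_neg (by simp),
        List.filter_eq_self.mpr (fun a ha => by
          have : hd ≠ a := fun e => hmem (e ▸ ha)
          simpa using this)]
    · apply List.map_congr_left
      intro a ha
      have hne : a ≠ hd := fun e => hmem (e ▸ ha)
      simp only [Function.comp_apply]
      rw [List.filter_cons_of_pos (by simpa using hne)]

theorem pv_bool1 (a b c d e f : Bool) :
    (!(a || b || c) && !(d || e) && f) = ((!(a || b) && !d) && (!c && (!e && f))) := by
  revert a b c d e f; decide

theorem pv_bool2 (a b c : Bool) :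
    (!(a || b) && !c) = (!a && (!b && !c)) := by
  revert a b c; decide

-- combine nested filters and match predicates pointwise
theorem pv_filter2 (xs : List Int) (w x : Int) :
    ((xs.filter fun b => !(w == b)).filter fun b => !(x == b))
      = xs.filter fun y => !(w == y) && !(x == y) := by
  rw [List.filter_filter]
  exact List.filter_congr (fun a _ => by cases w == a <;> cases x == a <;> rfl)

theorem pv_key (xs : List Int) (h : xs.Nodup) :
    (xs.flatMap fun w =>
      xs.flatMap fun x =>
        xs.flatMap fun y =>
          xs.flatMap fun z =>
            if (!(w == x || w == y || w == z) && !(x == y || x == z) && (y != z)) then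
              [(w, x, y, z)]
            else [])
    = (pvSelections xs).flatMap fun p =>
        (pvSelections p.2).flatMap fun q =>
          (pvSelections q.2).flatMap fun r =>
            r.2.map fun z => (p.1, q.1, r.1, z) := by
  -- rewrite B's side into filter form
  rw [pv_selections_eq xs h, List.flatMap_map]
  apply List.flatMap_congr
  intro w _
  rw [pv_selections_eq _ (h.filter _), List.flatMap_map]
  -- rewrite A's side level by level
  have hz : ∀ w x y : Int,
      (xs.flatMap fun z =>
        if (!(w == x || w == y || w == z) && !(x == y || x == z) && (y != z)) then
          [(w, x, y, z)]
        else [])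
      = if (!(w == x || w == y) && !(x == y)) then
          (xs.filter fun z => !(w == z) && (!(x == z) && (y != z))).map fun z => (w, x, y, z)
        else [] := by
    intro w x y
    have he : ∀ z : Int,
        (if (!(w == x || w == y || w == z) && !(x == y || x == z) && (y != z)) then
            ([(w, x, y, z)] : List (Int × Int × Int × Int)) else [])
        = if (!(w == x || w == y) && !(x == y)) then
            (if (!(w == z) && (!(x == z) && (y != z))) then [(w, x, y, z)] else []) else [] := by
      intro z
      rw [pv_bool1 (w == x) (w == y) (w == z) (x == y) (x == z) (y != z), pv_if_and]
    simp only [he]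
    rw [pv_flatMap_if_const, pv_flatMap_if, pv_flatMap_single]
  have hy : ∀ w x : Int,
      (xs.flatMap fun y =>
        if (!(w == x || w == y) && !(x == y)) then
          (xs.filter fun z => !(w == z) && (!(x == z) && (y != z))).map fun z => (w, x, y, z)
        else [])
      = if (!(w == x)) then
          (xs.filter fun y => !(w == y) && !(x == y)).flatMap fun y =>
            (xs.filter fun z => !(w == z) && (!(x == z) && (y != z))).map fun z => (w, x, y, z)
        else [] := by
    intro w x
    have he : ∀ y : Int,
        (if (!(w == x || w == y) && !(x == y)) then
            (xs.filter fun z => !(w == z) && (!(x == z) && (y != z))).map fun z =>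
              ((w, x, y, z) : Int × Int × Int × Int)
          else [])
        = if (!(w == x)) then
            (if (!(w == y) && !(x == y)) then
              (xs.filter fun z => !(w == z) && (!(x == z) && (y != z))).map fun z => (w, x, y, z)
            else []) else [] := by
      intro y
      rw [pv_bool2 (w == x) (w == y) (x == y), pv_if_and]
    simp only [he]
    rw [pv_flatMap_if_const, pv_flatMap_if]
  simp only [hz, hy]
  rw [pv_flatMap_if]
  apply List.flatMap_congr
  intro x _
  rw [pv_selections_eq _ ((h.filter _).filter _), List.flatMap_map]
  dsimp only
  rw [pv_filter2]
  apply List.flatMap_congr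
  intro y _
  rw [List.filter_filter]
  exact congrArg (List.map _) (List.filter_congr (fun a _ => by
    cases w == a <;> cases x == a <;> cases hya : y == a <;>
      simp [bne, hya])).symm

-- ===== VERDICT (by name: the statement is the Claim_ definition above) =====
theorem create_combinations_spec : Claim_equal_create_combinations := by
  intro d _
  unfold Spec_create_combinations create_combinations create_combinations_alt
  exact pv_key _ (PySem.List.nodup_pyRange_one 0 (d + 3))
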